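-- pv_equiv track=rewrite | github.com/candle-org/candle | src/candle/_backends/npu/creation.py | _tril_indices_shape
-- ===== SOURCE A (Python) =====
-- def _tril_indices_shape(row, col, offset):
--     row = int(row)
--     col = int(col)
--     offset = int(offset)
--     count = 0
--     for r in range(max(row, 0)):
--         max_c = min(col, r + offset + 1)
--         if max_c > 0:
--             count += max_c
--     return (2, count)
-- ===== SOURCE B (Python) =====
-- def _tril_indices_shape(row, col, offset):
--     # Closed-form: count = sum over r in [0,row) of max(0, min(col, r+offset+1)),
--     # split at the two clamp boundaries; O(1) instead of O(row).
--     row = max(int(row), 0)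
--     col = int(col)
--     offset = int(offset)
--     if col <= 0:
--         return (2, 0)
--     a = min(max(-offset, 0), row)            # rows [a, b) contribute r+offset+1 (the ramp)
--     b = min(max(col - offset - 1, a), row)   # rows [b, row) contribute col (the plateau)
--     ramp = (b - a) * (a + b + 2 * offset + 1) // 2
--     return (2, ramp + (row - b) * col)
-- ===== Notes on version B (the rewrite author's own statement) =====
-- stated objective: faster
-- what changed: Replaces the per-row loop summing clamped row widths by a closed-form arithmetic-series formula, splitting the sum at the two clamp boundaries of min(col, r+offset+1).
import Mathlib
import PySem

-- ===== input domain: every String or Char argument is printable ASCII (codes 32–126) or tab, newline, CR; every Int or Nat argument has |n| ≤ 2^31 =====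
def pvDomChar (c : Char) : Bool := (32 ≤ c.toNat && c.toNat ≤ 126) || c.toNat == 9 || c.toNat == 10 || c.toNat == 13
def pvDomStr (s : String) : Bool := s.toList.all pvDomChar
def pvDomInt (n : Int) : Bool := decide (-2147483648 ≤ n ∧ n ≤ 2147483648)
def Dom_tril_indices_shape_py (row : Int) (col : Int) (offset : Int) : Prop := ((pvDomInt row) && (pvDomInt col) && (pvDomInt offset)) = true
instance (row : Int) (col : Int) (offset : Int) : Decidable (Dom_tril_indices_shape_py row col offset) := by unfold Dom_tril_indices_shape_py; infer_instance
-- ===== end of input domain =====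

-- B replaces A's O(row) per-row loop by a closed-form sum split at the two clamp
-- boundaries of min(col, r+offset+1) (objective: faster, O(1)).
-- Python returns the tuple (2, count); both ports render it as the list [2, count].

-- ===== PORT A =====
-- literal transliteration: count = 0; for r in range(max(row,0)): max_c = min(col, r+offset+1); if max_c > 0: count += max_c
def tril_indices_shape_py (row : Int) (col : Int) (offset : Int) : List Int :=
  let count :=
    (PySem.List.pyRange 0 (max row 0) 1).foldl
      (fun count r =>
        let max_c := min col (r + offset + 1)
        if max_c > 0 then count + max_c else count) 0
  [2, count]

-- ===== PORT B =====
def tril_indices_shape_py_alt (row : Int) (col : Int) (offset : Int) : List Int :=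
  let row' := max row 0
  if col ≤ 0 then [2, 0]
  else
    let a := min (max (-offset) 0) row'
    let b := min (max (col - offset - 1) a) row'
    let ramp := PySem.Int.floordiv ((b - a) * (a + b + 2 * offset + 1)) 2
    [2, ramp + (row' - b) * col]

-- ===== PRECONDITION & SPEC =====
def Spec_tril_indices_shape_py (row : Int) (col : Int) (offset : Int) (out : List Int) : Prop := out = tril_indices_shape_py_alt row col offset
instance (row : Int) (col : Int) (offset : Int) (out : List Int) : Decidable (Spec_tril_indices_shape_py row col offset out) := by unfold Spec_tril_indices_shape_py; infer_instance

-- ===== CLAIM (what is proved, stated in full; the proofs are below) =====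
def Claim_equal_tril_indices_shape_py : Prop := ∀ (row : Int) (col : Int) (offset : Int), Dom_tril_indices_shape_py row col offset → Spec_tril_indices_shape_py row col offset (tril_indices_shape_py row col offset)

-- ===== LEMMAS AND PROOFS =====

-- boundaries of port B's closed form (rfl-equal to its a and b)
def pvA (offset : Int) (n : Int) : Int := min (max (-offset) 0) n
def pvB (col offset : Int) (n : Int) : Int := min (max (col - offset - 1) (pvA offset n)) n

-- twice the closed-form count for the first n rows (division-free form)
def pvG (col offset : Int) (n : Int) : Int :=
  if col ≤ 0 then 0
  else
    (pvB col offset n - pvA offset n) * (pvA offset n + pvB col offset n + 2 * offset + 1) +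
      2 * ((n - pvB col offset n) * col)

-- one loop step
lemma pvG_step (col offset : Int) (n : Int) (hn : 0 ≤ n) :
    pvG col offset (n + 1) =
      pvG col offset n +
        (if min col (n + offset + 1) > 0 then 2 * min col (n + offset + 1) else 0) := by
  unfold pvG pvB pvA
  by_cases hc : col ≤ 0
  · have h0 : ¬ min col (n + offset + 1) > 0 := by omega
    simp [hc, h0]
  · simp only [if_neg hc]
    by_cases h1 : n < max (-offset) 0
    · -- r+offset+1 ≤ 0 : term is 0, ramp and plateau still empty
      have hterm : ¬ min col (n + offset + 1) > 0 := by omega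
      have e1 : min (max (-offset) 0) n = n := by omega
      have e3 : min (max (-offset) 0) (n + 1) = n + 1 := by omega
      rw [e1, e3]
      have e2 : min (max (col - offset - 1) n) n = n := by omega
      have e4 : min (max (col - offset - 1) (n + 1)) (n + 1) = n + 1 := by omega
      rw [e2, e4, if_neg hterm]
      ring
    · have e1 : min (max (-offset) 0) n = max (-offset) 0 := by omega
      have e3 : min (max (-offset) 0) (n + 1) = max (-offset) 0 := by omega
      rw [e1, e3]
      by_cases h2 : n < col - offset - 1
      · -- ramp region: term is n+offset+1
        have hterm : min col (n + offset + 1) = n + offset + 1 := by omega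
        have hpos : n + offset + 1 > 0 := by omega
        have e2 : min (max (col - offset - 1) (max (-offset) 0)) n = n := by omega
        have e4 : min (max (col - offset - 1) (max (-offset) 0)) (n + 1) = n + 1 := by omega
        rw [e2, e4, hterm, if_pos hpos]
        ring
      · -- plateau region: term is col
        have hterm : min col (n + offset + 1) = col := by omega
        have hpos : col > 0 := by omega
        have e2 : min (max (col - offset - 1) (max (-offset) 0)) n =
            min (max (col - offset - 1) (max (-offset) 0)) (n + 1) := by omega
        rw [e2, hterm, if_pos hpos]
        ring

-- the loop of port A computes half of pvG
lemma pvLoop_eq (col offset : Int) (n : Nat) :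
    2 * ((PySem.List.pyRange 0 (n : Int) 1).foldl
      (fun count r =>
        if min col (r + offset + 1) > 0 then count + min col (r + offset + 1) else count) 0)
      = pvG col offset (n : Int) := by
  induction n with
  | zero =>
    rw [Nat.cast_zero, PySem.List.pyRange_one_eq_nil le_rfl, List.foldl_nil]
    unfold pvG pvB pvA
    by_cases hc : col ≤ 0
    · simp [hc]
    · rw [if_neg hc]
      have e1 : min (max (-offset) 0) (0 : Int) = 0 := by omega
      rw [e1]
      have e2 : min (max (col - offset - 1) (0 : Int)) 0 = 0 := by omega
      rw [e2]
      ring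
  | succ m ih =>
    have hcast : ((m + 1 : Nat) : Int) = (m : Int) + 1 := by push_cast; ring
    rw [hcast, PySem.List.pyRange_one_succ_right (by positivity), List.foldl_append,
      pvG_step col offset (m : Int) (by positivity)]
    simp only [List.foldl_cons, List.foldl_nil]
    split_ifs <;> omega

-- the product in port B is even
lemma pvProd_even (a b offset : Int) : 2 ∣ (b - a) * (a + b + 2 * offset + 1) := by
  rcases Int.even_or_odd (b - a) with ⟨k, hk⟩ | ⟨k, hk⟩
  · exact ⟨k * (a + b + 2 * offset + 1), by linear_combination (a + b + 2 * offset + 1) * hk⟩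
  · exact ⟨(b - a) * (k + a + offset + 1), by linear_combination (b - a) * hk⟩

theorem pvEquiv (row col offset : Int) :
    tril_indices_shape_py row col offset = tril_indices_shape_py_alt row col offset := by
  show [2, (PySem.List.pyRange 0 (max row 0) 1).foldl
      (fun count r =>
        if min col (r + offset + 1) > 0 then count + min col (r + offset + 1) else count) 0]
    = tril_indices_shape_py_alt row col offset
  unfold tril_indices_shape_py_alt
  have hn : ((max row 0).toNat : Int) = max row 0 := by omega
  have hloop := pvLoop_eq col offset (max row 0).toNat
  rw [hn] at hloop
  by_cases hc : col ≤ 0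
  · rw [if_pos hc]
    have hG : pvG col offset (max row 0) = 0 := by unfold pvG; rw [if_pos hc]
    rw [hG] at hloop
    simp only [List.cons.injEq, and_true, true_and]
    omega
  · rw [if_neg hc]
    have hG : pvG col offset (max row 0) =
        (pvB col offset (max row 0) - pvA offset (max row 0)) *
          (pvA offset (max row 0) + pvB col offset (max row 0) + 2 * offset + 1) +
        2 * ((max row 0 - pvB col offset (max row 0)) * col) := by
      unfold pvG; rw [if_neg hc]
    rw [hG] at hloop
    obtain ⟨k, hk⟩ := pvProd_even (pvA offset (max row 0)) (pvB col offset (max row 0)) offset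
    have hdiv : PySem.Int.floordiv
        ((pvB col offset (max row 0) - pvA offset (max row 0)) *
          (pvA offset (max row 0) + pvB col offset (max row 0) + 2 * offset + 1)) 2 = k := by
      rw [hk, PySem.Int.floordiv_eq_ediv_of_pos (by norm_num)]
      omega
    show [2, _] = [2, PySem.Int.floordiv
        ((pvB col offset (max row 0) - pvA offset (max row 0)) *
          (pvA offset (max row 0) + pvB col offset (max row 0) + 2 * offset + 1)) 2
        + (max row 0 - pvB col offset (max row 0)) * col]
    rw [hdiv]
    rw [hk] at hloop
    simp only [List.cons.injEq, and_true, true_and]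
    omega

-- ===== VERDICT (by name: the statement is the Claim_ definition above) =====
theorem tril_indices_shape_py_spec : Claim_equal_tril_indices_shape_py := by
  intro row col offset _
  unfold Spec_tril_indices_shape_py
  exact pvEquiv row col offset
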